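-- pv_equiv track=rewrite | github.com/jmqd/learning | python/coding-challenges/google_foobar/level-3/string_cleaning/solution.py | decode_chunk
-- ===== SOURCE A (Python) =====
-- from collections import deque
--
-- def get_occurences(chunk, word):
--     start = 0
--     while True:
--         start = chunk.find(word, start)
--         if start > -1:
--             yield (start, start + len(word),)
--             start += 1
--         else:
--             break
--
-- def remove_slice(chunk, start, end):
--     return chunk[:start] + chunk [end:]
--
-- def decode_chunk(chunk, word):
--     answer = chunk
--     seen = set()
--     queue = deque([chunk])
--
--     while len(queue):
--         value = queue.popleft()
--         matches = get_occurences(value, word)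
--         for start, end in matches:
--             potential = remove_slice(value, start, end)
--             if potential in seen:
--                 continue
--             elif len(potential) == len(answer):
--                 answer = min(answer, potential)
--             elif len(potential) < len(answer):
--                 answer = potential
--             seen.add(potential)
--             queue.append(potential)
--     return answer
-- ===== SOURCE B (Python) =====
-- def decode_chunk(chunk, word):
--     if not word:
--         return chunk
--     memo = {}
--
--     def best(s):
--         if s in memo:
--             return memo[s]
--         r = (len(s), s)
--         i = s.find(word)
--         while i != -1:
--             r = min(r, best(s[:i] + s[i + len(word):]))
--             i = s.find(word, i + 1)
--         memo[s] = r
--         return r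
--
--     return best(chunk)[1]
-- ===== Notes on version B (the rewrite author's own statement) =====
-- stated objective: alternative
-- what changed: Replaces the deque-BFS with a shared seen set, queue and incremental three-branch minimum by a memoized recursion: best(s) is the (len, lex)-minimal key over s and best of each one-step deletion of word, cached per string, with the overall answer best(chunk).
import Mathlib
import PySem

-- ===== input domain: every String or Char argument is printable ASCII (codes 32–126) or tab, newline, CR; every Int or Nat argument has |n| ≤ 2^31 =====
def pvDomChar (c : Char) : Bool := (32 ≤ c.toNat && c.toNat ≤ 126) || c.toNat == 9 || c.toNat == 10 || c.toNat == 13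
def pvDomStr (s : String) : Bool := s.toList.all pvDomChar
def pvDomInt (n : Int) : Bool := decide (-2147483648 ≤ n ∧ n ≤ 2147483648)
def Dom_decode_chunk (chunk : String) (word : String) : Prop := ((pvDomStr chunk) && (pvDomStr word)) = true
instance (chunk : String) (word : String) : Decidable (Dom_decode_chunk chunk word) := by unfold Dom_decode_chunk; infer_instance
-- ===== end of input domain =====

-- B replaces A's deque-BFS with a shared seen set and incremental three-branch minimum by a
-- memoized recursion best(s) = min over (len, lex) of s and best of each one-step deletion
-- (objective: alternative; same asymptotic cost).

-- ===== PORT A =====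

-- s.find(sub, start) with start past len(s) is -1 (CPython quirk kept by PySem);
-- cited by pvOccA's decreasing_by.
theorem pvFindFromPastLen (s sub : List Char) (k : Nat) (hk : s.length < k) :
    PySem.Chars.findFrom s sub (k : Int) none = -1 := by
  unfold PySem.Chars.findFrom
  have h1 : ¬ ((k:Int) < 0) := by omega
  have h2 : ((s.length:Int) < (k:Int)) := by omega
  simp [h1, h2]

-- get_occurences, materialised: the list of (start, start+len(word)) pairs the generator yields.
-- `start` stays a Nat: it is 0 initially and `found+1` with found ≥ 0 afterwards.
def pvOccA (value w : List Char) (start : Nat) : List (Int × Int) :=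
  let f := PySem.Chars.findFrom value w (start : Int) none
  if h : -1 < f then
    (f, f + (w.length : Int)) :: pvOccA value w (f.toNat + 1)
  else []
termination_by value.length + 1 - start
decreasing_by
  replace h : -1 < PySem.Chars.findFrom value w (start : Int) none := h
  by_cases hs : start ≤ value.length
  · rw [PySem.Chars.findFrom_natCast value w start hs] at h ⊢
    split at h
    · omega
    · rename_i hne
      have h0 : (0:Int) ≤ PySem.Chars.find (List.drop start value) w := by
        have := PySem.Chars.neg_one_le_find (List.drop start value) w
        omega
      have h1 := PySem.Chars.find_le_length (List.drop start value) w
      simp only [List.length_drop] at h1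
      split
      · omega
      · omega
  · exfalso
    rw [pvFindFromPastLen value w start (by omega)] at h
    omega

-- remove_slice(chunk, start, end) = chunk[:start] + chunk[end:]
def pvRemoveSlice (chunk : List Char) (start stop : Int) : List Char :=
  PySem.List.slice chunk none (some start) ++ PySem.List.slice chunk (some stop) none

-- the BFS while-loop; state = (answer, seen, queue); one fuel unit per popped value
-- (fuel is only a totality guard, never reached before the queue empties on the given budget)
def pvLoopA (w : List Char) :
    Nat → List Char → PySem.Set (List Char) → List (List Char) → List Char
  | _, answer, _, [] => answer
  | 0, answer, _, _ :: _ => answer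
  | Nat.succ fuel, answer, seen, value :: queue =>
    let st := (pvOccA value w 0).foldl
      (fun (st : List Char × PySem.Set (List Char) × List (List Char)) se =>
        let potential := pvRemoveSlice value se.1 se.2
        if PySem.Set.contains st.2.1 potential then st
        else
          let answer' :=
            if potential.length = st.1.length then
              (if potential < st.1 then potential else st.1)   -- min(answer, potential)
            else if potential.length < st.1.length then potential else st.1
          (answer', PySem.Set.add st.2.1 potential, st.2.2 ++ [potential]))
      (answer, seen, queue)
    pvLoopA w fuel st.1 st.2.1 st.2.2

def decode_chunk (chunk : String) (word : String) : String :=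
  String.ofList
    (pvLoopA word.toList (2 ^ (chunk.toList.length + 2)) chunk.toList PySem.Set.empty
      [chunk.toList])

-- ===== PORT B =====

-- min(r, p) on Python pairs (len(s), s): lexicographic tuple comparison, second
-- argument taken exactly when p < r (hand-port of tuple '<'; exact)
def pvTupMin (r p : Nat × List Char) : Nat × List Char :=
  if p.1 < r.1 ∨ (p.1 = r.1 ∧ p.2 < r.2) then p else r

mutual
-- best(s): memo lookup, else fold min over the one-step deletions (fuel: totality guard only)
def pvBest (w : List Char) (fuel : Nat)
    (memo : PySem.Dict (List Char) (Nat × List Char)) (s : List Char) :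
    (Nat × List Char) × PySem.Dict (List Char) (Nat × List Char) :=
  match fuel with
  | 0 => ((s.length, s), memo)
  | Nat.succ fuel =>
    match PySem.Dict.get? memo s with
    | some v => (v, memo)
    | none =>
      let p := pvBestLoop w fuel (s.length + 1) memo s (s.length, s)
        (PySem.Chars.findFrom s w 0 none)
      (p.1, PySem.Dict.insert p.2 s p.1)
termination_by (fuel, 0)

-- the `while i != -1` loop of best; state = (r, memo, i); k is an inner totality guard
def pvBestLoop (w : List Char) (fuel k : Nat)
    (memo : PySem.Dict (List Char) (Nat × List Char)) (s : List Char)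
    (r : Nat × List Char) (i : Int) :
    (Nat × List Char) × PySem.Dict (List Char) (Nat × List Char) :=
  match k with
  | 0 => (r, memo)
  | Nat.succ k =>
    if i ≠ -1 then
      let c := PySem.List.slice s none (some i) ++
        PySem.List.slice s (some (i + (w.length : Int))) none
      let q := pvBest w fuel memo c
      pvBestLoop w fuel k q.2 s (pvTupMin r q.1) (PySem.Chars.findFrom s w (i + 1) none)
    else (r, memo)
termination_by (fuel, k + 1)
end

def decode_chunk_alt (chunk : String) (word : String) : String :=
  if word.toList = [] then chunk
  else
    String.ofList
      ((pvBest word.toList (chunk.toList.length + 1) PySem.Dict.empty chunk.toList).1.2)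

-- ===== PRECONDITION & SPEC =====
def Spec_decode_chunk (chunk : String) (word : String) (out : String) : Prop := out = decode_chunk_alt chunk word
instance (chunk : String) (word : String) (out : String) : Decidable (Spec_decode_chunk chunk word out) := by unfold Spec_decode_chunk; infer_instance

-- ===== CLAIM (what is proved, stated in full; the proofs are below) =====
def Claim_equal_decode_chunk : Prop := ∀ (chunk : String) (word : String), Dom_decode_chunk chunk word → Spec_decode_chunk chunk word (decode_chunk chunk word)

-- ===== LEMMAS AND PROOFS =====

-- children of v: the deletions A's generator produces and B recurses into
def pvChildren (w v : List Char) : List (List Char) :=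
  (pvOccA v w 0).map (fun p => pvRemoveSlice v p.1 p.2)

def pvStepR (w a b : List Char) : Prop := b ∈ pvChildren w a

def pvReach (w : List Char) : List Char → List Char → Prop :=
  Relation.ReflTransGen (pvStepR w)

-- the (len, lex) key order; kLe a b = "a's key ≤ b's key"
def pvKLe (a b : List Char) : Prop :=
  a.length < b.length ∨ (a.length = b.length ∧ ¬ b < a)

-- A's three-branch answer update (definitionally the inline update in pvLoopA)
def pvKmin (a b : List Char) : List Char :=
  if b.length = a.length then (if b < a then b else a)
  else if b.length < a.length then b else a

def pvIsMin (w c m : List Char) : Prop :=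
  pvReach w c m ∧ ∀ t, pvReach w c t → pvKLe m t

theorem pvKLe_refl (a : List Char) : pvKLe a a := Or.inr ⟨rfl, lt_irrefl a⟩

theorem pvKLe_trans {a b c : List Char} (h1 : pvKLe a b) (h2 : pvKLe b c) : pvKLe a c := by
  unfold pvKLe at h1 h2 ⊢
  rcases h1 with h1 | ⟨e1, n1⟩
  · rcases h2 with h2 | ⟨e2, n2⟩
    · exact Or.inl (by omega)
    · exact Or.inl (by omega)
  · rcases h2 with h2 | ⟨e2, n2⟩
    · exact Or.inl (by omega)
    · refine Or.inr ⟨by omega, fun hca => ?_⟩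
      rcases lt_trichotomy b c with h | h | h
      · exact n1 (lt_trans h hca)
      · exact n1 (by rw [h]; exact hca)
      · exact n2 h

theorem pvKLe_antisymm {a b : List Char} (h1 : pvKLe a b) (h2 : pvKLe b a) : a = b := by
  unfold pvKLe at h1 h2
  rcases h1 with h1 | ⟨e1, n1⟩ <;> rcases h2 with h2 | ⟨e2, n2⟩ <;> try omega
  rcases lt_trichotomy a b with h | h | h
  · exact absurd h n2
  · exact h
  · exact absurd h n1

theorem pvIsMin_unique {w c m₁ m₂ : List Char} (h1 : pvIsMin w c m₁) (h2 : pvIsMin w c m₂) :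
    m₁ = m₂ :=
  pvKLe_antisymm (h1.2 m₂ h2.1) (h2.2 m₁ h1.1)

theorem pvKmin_cases (a b : List Char) : pvKmin a b = a ∨ pvKmin a b = b := by
  unfold pvKmin; split_ifs <;> simp

theorem pvKLe_kmin_left (a b : List Char) : pvKLe (pvKmin a b) a := by
  unfold pvKmin
  split_ifs with h1 h2 h3
  · exact Or.inr ⟨h1, lt_asymm h2⟩
  · exact pvKLe_refl a
  · exact Or.inl h3
  · exact pvKLe_refl a

theorem pvKLe_kmin_right (a b : List Char) : pvKLe (pvKmin a b) b := by
  unfold pvKmin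
  split_ifs with h1 h2 h3
  · exact pvKLe_refl b
  · exact Or.inr ⟨h1.symm, h2⟩
  · exact pvKLe_refl b
  · exact Or.inl (by omega)

-- B's tuple min is A's three-branch min on the keys
theorem pvTupMin_eq_kmin (a b : List Char) :
    pvTupMin (a.length, a) (b.length, b) = ((pvKmin a b).length, pvKmin a b) := by
  unfold pvTupMin pvKmin
  by_cases h1 : b.length = a.length
  · by_cases h2 : b < a
    · rw [if_pos (Or.inr ⟨h1, h2⟩), if_pos h1, if_pos h2]
    · have : ¬ (b.length < a.length ∨ (b.length = a.length ∧ b < a)) := by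
        rintro (h | ⟨_, h⟩) <;> [omega; exact h2 h]
      rw [if_neg this, if_pos h1, if_neg h2]
  · by_cases h3 : b.length < a.length
    · rw [if_pos (Or.inl h3), if_neg h1, if_pos h3]
    · have : ¬ (b.length < a.length ∨ (b.length = a.length ∧ b < a)) := by
        rintro (h | ⟨h, _⟩) <;> omega
      rw [if_neg this, if_neg h1, if_neg h3]

-- every yielded occurrence: a nonnegative start j with end j+|w|, inside the string,
-- where w is a prefix of the drop
theorem pvOcc_mem (value w : List Char) (start : Nat) (p : Int × Int)
    (hp : p ∈ pvOccA value w start) :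
    ∃ j : Nat, p = ((j : Int), (j : Int) + w.length) ∧ j + w.length ≤ value.length ∧
      w <+: value.drop j := by
  rw [pvOccA] at hp
  by_cases h : -1 < PySem.Chars.findFrom value w (start : Int) none
  · rw [dif_pos h] at hp
    set f := PySem.Chars.findFrom value w (start : Int) none with hf
    have hs : start ≤ value.length := by
      by_contra hs
      rw [hf, pvFindFromPastLen value w start (by omega)] at h
      omega
    have hfn : f ≤ (value.length : Int) := by
      rw [hf, PySem.Chars.findFrom_natCast value w start hs]
      have h1 := PySem.Chars.find_le_length (List.drop start value) w
      simp only [List.length_drop] at h1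
      split <;> omega
    obtain ⟨hk1, hk2, hk3⟩ := PySem.Chars.findFrom_natCast_spec value w start hs (by omega)
    rw [← hf] at hk1 hk2 hk3
    rcases List.mem_cons.mp hp with rfl | hp'
    · have h0 : ((f.toNat : Nat) : Int) = f := Int.toNat_of_nonneg (by omega)
      refine ⟨f.toNat, by rw [h0], ?_, hk2⟩
      have := hk2.length_le
      simp only [List.length_drop] at this
      omega
    · exact pvOcc_mem value w (f.toNat + 1) p hp'
  · rw [dif_neg h] at hp
    cases hp
termination_by value.length + 1 - start
decreasing_by
  have : (start : Int) ≤ f := hk1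
  omega

-- children are the deletions: c = take j ++ drop (j+|w|) at a matching position j
theorem pvChild_spec (w v c : List Char) (hc : c ∈ pvChildren w v) :
    ∃ j : Nat, j + w.length ≤ v.length ∧ w <+: v.drop j ∧
      c = v.take j ++ v.drop (j + w.length) := by
  rcases List.mem_map.mp hc with ⟨p, hp, rfl⟩
  rcases pvOcc_mem v w 0 p hp with ⟨j, rfl, hle, hpre⟩
  refine ⟨j, hle, hpre, ?_⟩
  unfold pvRemoveSlice
  have hc : ((j : Int) + (w.length : Int)) = ((j + w.length : Nat) : Int) := by push_cast; ring
  rw [hc, PySem.List.slice_to v (Int.natCast_nonneg j),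
    PySem.List.slice_from v (Int.natCast_nonneg (j + w.length))]
  simp
  omega

theorem pvChild_sublist {w v c : List Char} (hc : c ∈ pvChildren w v) : c.Sublist v := by
  rcases pvChild_spec w v c hc with ⟨j, hle, _, rfl⟩
  calc (v.take j ++ v.drop (j + w.length)).Sublist (v.take j ++ v.drop j) := by
        refine List.Sublist.append (List.Sublist.refl _) ?_
        rw [← List.drop_drop]
        exact List.drop_sublist ..
    _ = v := List.take_append_drop j v

theorem pvChild_nil {v c : List Char} (hc : c ∈ pvChildren [] v) : c = v := by
  rcases pvChild_spec [] v c hc with ⟨j, _, _, rfl⟩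
  simp

-- a Nodup family of sublists of ch has at most 2^|ch| members
theorem pvCard (ch : List Char) (sn : List (List Char)) (hnd : sn.Nodup)
    (hsub : ∀ x ∈ sn, x.Sublist ch) : sn.length ≤ 2 ^ ch.length := by
  have h1 : sn.length = sn.toFinset.card := (List.toFinset_card_of_nodup hnd).symm
  have h2 : sn.toFinset ⊆ ch.sublists.toFinset := by
    intro x hx
    rw [List.mem_toFinset] at hx ⊢
    exact List.mem_sublists.mpr (hsub x hx)
  calc sn.length = sn.toFinset.card := h1
    _ ≤ ch.sublists.toFinset.card := Finset.card_le_card h2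
    _ ≤ ch.sublists.length := ch.sublists.toFinset_card_le
    _ = 2 ^ ch.length := List.length_sublists ..

-- A's inner fold body (definitionally the lambda in pvLoopA)
def pvFA (value _w : List Char)
    (st : List Char × PySem.Set (List Char) × List (List Char)) (se : Int × Int) :
    List Char × PySem.Set (List Char) × List (List Char) :=
  let potential := pvRemoveSlice value se.1 se.2
  if PySem.Set.contains st.2.1 potential then st
  else
    let answer' :=
      if potential.length = st.1.length then
        (if potential < st.1 then potential else st.1)
      else if potential.length < st.1.length then potential else st.1
    (answer', PySem.Set.add st.2.1 potential, st.2.2 ++ [potential])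

-- one inner fold step-by-step: new elements t are appended to both seen and queue,
-- all processed deletions end up in seen, the answer is the running key-minimum
theorem pvFoldA (value w : List Char) (l : List (Int × Int)) :
    ∀ (ans : List Char) (sn : PySem.Set (List Char)) (q : List (List Char)),
      ∃ t, (l.foldl (pvFA value w) (ans, sn, q)).2.1 = sn ++ t ∧
        (l.foldl (pvFA value w) (ans, sn, q)).2.2 = q ++ t ∧
        (∀ x ∈ t, ∃ p ∈ l, x = pvRemoveSlice value p.1 p.2) ∧
        (∀ p ∈ l, pvRemoveSlice value p.1 p.2 ∈ sn ++ t) ∧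
        pvKLe (l.foldl (pvFA value w) (ans, sn, q)).1 ans ∧
        (∀ x ∈ t, pvKLe (l.foldl (pvFA value w) (ans, sn, q)).1 x) ∧
        ((l.foldl (pvFA value w) (ans, sn, q)).1 = ans ∨
          (l.foldl (pvFA value w) (ans, sn, q)).1 ∈ t) ∧
        (sn.Nodup → (sn ++ t).Nodup) := by
  induction l with
  | nil =>
    intro ans sn q
    exact ⟨[], by simp, by simp, by simp, by simp, pvKLe_refl ans, by simp, Or.inl rfl,
      by simp⟩
  | cons p l ih =>
    intro ans sn q
    rw [List.foldl_cons]
    by_cases hmem : pvRemoveSlice value p.1 p.2 ∈ sn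
    · have hstep : pvFA value w (ans, sn, q) p = (ans, sn, q) := by
        unfold pvFA
        rw [if_pos (by rw [PySem.Set.contains_iff]; exact hmem)]
      rw [hstep]
      obtain ⟨t, h1, h2, h3, h4, h5, h6, h7, h8⟩ := ih ans sn q
      refine ⟨t, h1, h2, ?_, ?_, h5, h6, h7, h8⟩
      · intro x hx
        rcases h3 x hx with ⟨p', hp', he⟩
        exact ⟨p', List.mem_cons_of_mem p hp', he⟩
      · intro p' hp'
        rcases List.mem_cons.mp hp' with rfl | hp''
        · exact List.mem_append_left t hmem
        · exact h4 p' hp''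
    · have hstep : pvFA value w (ans, sn, q) p =
          (pvKmin ans (pvRemoveSlice value p.1 p.2), sn ++ [pvRemoveSlice value p.1 p.2],
            q ++ [pvRemoveSlice value p.1 p.2]) := by
        unfold pvFA
        rw [if_neg (by rw [PySem.Set.contains_iff]; exact hmem),
          PySem.Set.add_of_not_mem hmem]
        rfl
      rw [hstep]
      obtain ⟨t', h1, h2, h3, h4, h5, h6, h7, h8⟩ :=
        ih (pvKmin ans (pvRemoveSlice value p.1 p.2)) (sn ++ [pvRemoveSlice value p.1 p.2])
          (q ++ [pvRemoveSlice value p.1 p.2])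
      refine ⟨pvRemoveSlice value p.1 p.2 :: t', ?_, ?_, ?_, ?_, ?_, ?_, ?_, ?_⟩
      · rw [h1]; simp
      · rw [h2]; simp
      · intro x hx
        rcases List.mem_cons.mp hx with rfl | hx'
        · exact ⟨p, List.mem_cons_self .., rfl⟩
        · rcases h3 x hx' with ⟨p', hp', he⟩
          exact ⟨p', List.mem_cons_of_mem p hp', he⟩
      · intro p' hp'
        rcases List.mem_cons.mp hp' with rfl | hp''
        · simp
        · have := h4 p' hp''
          simpa [List.append_assoc] using this
      · exact pvKLe_trans h5 (pvKLe_kmin_left ans (pvRemoveSlice value p.1 p.2))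
      · intro x hx
        rcases List.mem_cons.mp hx with rfl | hx'
        · exact pvKLe_trans h5 (pvKLe_kmin_right ans (pvRemoveSlice value p.1 p.2))
        · exact h6 x hx'
      · rcases h7 with h7 | h7
        · rcases pvKmin_cases ans (pvRemoveSlice value p.1 p.2) with hk | hk
          · exact Or.inl (h7.trans hk)
          · refine Or.inr ?_
            rw [h7, hk]
            exact List.mem_cons_self ..
        · exact Or.inr (List.mem_cons_of_mem _ h7)
      · intro hnd
        have hnd' : (sn ++ [pvRemoveSlice value p.1 p.2]).Nodup := by
          simp [List.nodup_append, hnd]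
          exact fun a ha hae => hmem (hae ▸ ha)
        have := h8 hnd'
        simpa [List.append_assoc] using this

-- the BFS loop returns the key-minimum of everything reachable from ch
theorem pvLoopA_isMin (w ch : List Char) : ∀ (fuel : Nat) (ans : List Char)
    (sn : PySem.Set (List Char)) (q : List (List Char)),
    (∀ x ∈ sn, pvReach w ch x ∧ x.Sublist ch) →
    (∀ x ∈ q, x ∈ ch :: sn) →
    ans ∈ ch :: sn →
    (∀ x ∈ ch :: sn, pvKLe ans x) →
    (∀ x ∈ ch :: sn, x ∈ q ∨ ∀ c ∈ pvChildren w x, c ∈ sn) →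
    sn.Nodup →
    q.length + (2 ^ ch.length - sn.length) ≤ fuel →
    pvIsMin w ch (pvLoopA w fuel ans sn q) := by
  intro fuel
  induction fuel with
  | zero =>
    intro ans sn q hsn hq hansm hansle hclosed hnd hfuel
    match q, hq with
    | [], _ =>
      have hval : pvLoopA w 0 ans sn [] = ans := rfl
      rw [hval]
      have hmem : ∀ t, pvReach w ch t → t ∈ ch :: sn := by
        intro t ht
        induction ht with
        | refl => exact List.mem_cons_self ..
        | tail _ hbc ih2 =>
          rename_i b c _
          have := (hclosed b ih2).resolve_left (by intro hb; cases hb)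
          exact List.mem_cons_of_mem ch (this c hbc)
      constructor
      · rcases List.mem_cons.mp hansm with rfl | hm
        · exact Relation.ReflTransGen.refl
        · exact (hsn ans hm).1
      · exact fun t ht => hansle t (hmem t ht)
    | v :: qs, hq =>
      exfalso
      have hcard : sn.length ≤ 2 ^ ch.length := pvCard ch sn hnd (fun x hx => (hsn x hx).2)
      simp only [List.length_cons] at hfuel
      omega
  | succ fuel ih =>
    intro ans sn q hsn hq hansm hansle hclosed hnd hfuel
    match q with
    | [] =>
      -- same closure argument as the zero case: queue empty, answer is the minimum
      have hval : pvLoopA w (fuel + 1) ans sn [] = ans := rfl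
      rw [hval]
      have hmem : ∀ t, pvReach w ch t → t ∈ ch :: sn := by
        intro t ht
        induction ht with
        | refl => exact List.mem_cons_self ..
        | tail _ hbc ih2 =>
          rename_i b c _
          have := (hclosed b ih2).resolve_left (by intro hb; cases hb)
          exact List.mem_cons_of_mem ch (this c hbc)
      constructor
      · rcases List.mem_cons.mp hansm with rfl | hm
        · exact Relation.ReflTransGen.refl
        · exact (hsn ans hm).1
      · exact fun t ht => hansle t (hmem t ht)
    | v :: qs =>
      have hvreach : pvReach w ch v := by
        rcases List.mem_cons.mp (hq v (List.mem_cons_self ..)) with rfl | hm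
        · exact Relation.ReflTransGen.refl
        · exact (hsn v hm).1
      have hvsub : v.Sublist ch := by
        rcases List.mem_cons.mp (hq v (List.mem_cons_self ..)) with rfl | hm
        · exact List.Sublist.refl v
        · exact (hsn v hm).2
      have hstep : pvLoopA w (fuel + 1) ans sn (v :: qs) =
          pvLoopA w fuel ((pvOccA v w 0).foldl (pvFA v w) (ans, sn, qs)).1
            ((pvOccA v w 0).foldl (pvFA v w) (ans, sn, qs)).2.1
            ((pvOccA v w 0).foldl (pvFA v w) (ans, sn, qs)).2.2 := by
        rw [pvLoopA]
        rfl
      rw [hstep]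
      obtain ⟨t, h1, h2, h3, h4, h5, h6, h7, h8⟩ := pvFoldA v w (pvOccA v w 0) ans sn qs
      have htch : ∀ x ∈ t, x ∈ pvChildren w v := by
        intro x hx
        rcases h3 x hx with ⟨p, hp, rfl⟩
        exact List.mem_map.mpr ⟨p, hp, rfl⟩
      have htreach : ∀ x ∈ t, pvReach w ch x :=
        fun x hx => Relation.ReflTransGen.tail hvreach (htch x hx)
      have hsn' : ∀ x ∈ sn ++ t, pvReach w ch x ∧ x.Sublist ch := by
        intro x hx
        rcases List.mem_append.mp hx with hx' | hx'
        · exact hsn x hx'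
        · exact ⟨htreach x hx', (pvChild_sublist (htch x hx')).trans hvsub⟩
      rw [h1, h2]
      apply ih _ _ _ hsn'
      · intro x hx
        rcases List.mem_append.mp hx with hx' | hx'
        · rcases List.mem_cons.mp (hq x (List.mem_cons_of_mem v hx')) with rfl | hm
          · exact List.mem_cons_self ..
          · exact List.mem_cons_of_mem _ (List.mem_append_left t hm)
        · exact List.mem_cons_of_mem _ (List.mem_append_right sn hx')
      · rcases h7 with h7' | h7'
        · rw [h7']
          rcases List.mem_cons.mp hansm with rfl | hm
          · exact List.mem_cons_self ..
          · exact List.mem_cons_of_mem _ (List.mem_append_left t hm)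
        · exact List.mem_cons_of_mem _ (List.mem_append_right sn h7')
      · intro x hx
        rcases List.mem_cons.mp hx with rfl | hx'
        · exact pvKLe_trans h5 (hansle x (List.mem_cons_self ..))
        · rcases List.mem_append.mp hx' with hx'' | hx''
          · exact pvKLe_trans h5 (hansle x (List.mem_cons_of_mem _ hx''))
          · exact h6 x hx''
      · intro x hx
        rcases List.mem_cons.mp hx with rfl | hx'
        · -- x = ch
          rcases hclosed x (List.mem_cons_self ..) with hm | hm
          · rcases List.mem_cons.mp hm with rfl | hm'
            · refine Or.inr (fun c hc => ?_)
              rcases List.mem_map.mp hc with ⟨p, hp, rfl⟩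
              exact h4 p hp
            · exact Or.inl (List.mem_append_left t hm')
          · exact Or.inr (fun c hc => List.mem_append_left t (hm c hc))
        · rcases List.mem_append.mp hx' with hx'' | hx''
          · rcases hclosed x (List.mem_cons_of_mem ch hx'') with hm | hm
            · rcases List.mem_cons.mp hm with rfl | hm'
              · refine Or.inr (fun c hc => ?_)
                rcases List.mem_map.mp hc with ⟨p, hp, rfl⟩
                exact h4 p hp
              · exact Or.inl (List.mem_append_left t hm')
            · exact Or.inr (fun c hc => List.mem_append_left t (hm c hc))
          · exact Or.inl (List.mem_append_right qs hx'')
      · exact h8 hnd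
      · have hcard : (sn ++ t).length ≤ 2 ^ ch.length :=
          pvCard ch (sn ++ t) (h8 hnd) (fun x hx => (hsn' x hx).2)
        simp only [List.length_append, List.length_cons] at hfuel hcard ⊢
        omega

-- A computes the key-minimum of the reachable set
theorem pvA_isMin (ch w : List Char) :
    pvIsMin w ch (pvLoopA w (2 ^ (ch.length + 2)) ch PySem.Set.empty [ch]) := by
  apply pvLoopA_isMin w ch
  · intro x hx; cases hx
  · intro x hx; simp_all
  · simp
  · intro x hx
    simp only [PySem.Set.empty] at hx
    rcases List.mem_singleton.mp hx with rfl
    exact pvKLe_refl x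
  · intro x hx
    simp only [PySem.Set.empty] at hx
    rcases List.mem_singleton.mp hx with rfl
    exact Or.inl (List.mem_singleton.mpr rfl)
  · exact List.nodup_nil
  · have h4 : 2 ^ (ch.length + 2) = 4 * 2 ^ ch.length := by ring
    simp only [PySem.Set.empty, List.length_singleton, List.length_nil]
    have := Nat.one_le_two_pow (n := ch.length)
    omega

-- B's memo invariant: every stored value is the key of the minimum for its key string
def pvMemoOK (w : List Char) (memo : PySem.Dict (List Char) (Nat × List Char)) : Prop :=
  ∀ k v, memo.get? k = some v → ∃ m, pvIsMin w k m ∧ v = (m.length, m)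

-- one full run of the while-loop from find position b: accumulates the minimum over
-- the children at positions ≥ b (each solved by pvBest), threading the memo
theorem pvLoopB_ok (w : List Char) (hw : w ≠ []) (fuel : Nat) (s : List Char)
    (hbest : ∀ (memo : PySem.Dict (List Char) (Nat × List Char)) (c : List Char),
      c.length < s.length → pvMemoOK w memo →
      pvMemoOK w (pvBest w fuel memo c).2 ∧
        ∃ m, pvIsMin w c m ∧ (pvBest w fuel memo c).1 = (m.length, m)) :
    ∀ (k b : Nat) (memo : PySem.Dict (List Char) (Nat × List Char))
      (r : Nat × List Char) (mr : List Char),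
      s.length + 1 - b ≤ k → pvMemoOK w memo → r = (mr.length, mr) →
      pvMemoOK w (pvBestLoop w fuel k memo s r (PySem.Chars.findFrom s w (b : Int) none)).2 ∧
      ∃ m', (pvBestLoop w fuel k memo s r (PySem.Chars.findFrom s w (b : Int) none)).1
            = (m'.length, m') ∧ pvKLe m' mr ∧
        (m' = mr ∨ ∃ c ∈ (pvOccA s w b).map (fun p => pvRemoveSlice s p.1 p.2), pvReach w c m') ∧
        (∀ c ∈ (pvOccA s w b).map (fun p => pvRemoveSlice s p.1 p.2),
          ∀ t, pvReach w c t → pvKLe m' t) := by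
  intro k
  induction k with
  | zero =>
    intro b memo r mr hk hmemo hr
    have hb : s.length < b := by omega
    have hocc : pvOccA s w b = [] := by
      rw [pvOccA, dif_neg (by rw [pvFindFromPastLen s w b hb]; omega)]
    have hval : pvBestLoop w fuel 0 memo s r (PySem.Chars.findFrom s w (b : Int) none)
        = (r, memo) := by rw [pvBestLoop]
    rw [hval, hocc]
    exact ⟨hmemo, mr, hr, pvKLe_refl mr, Or.inl rfl, by simp⟩
  | succ k ihk =>
    intro b memo r mr hk hmemo hr
    set f := PySem.Chars.findFrom s w (b : Int) none with hf
    by_cases hfneg : f = -1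
    · have hocc : pvOccA s w b = [] := by
        rw [pvOccA, dif_neg (by rw [← hf, hfneg]; omega)]
      have hval : pvBestLoop w fuel (k + 1) memo s r f = (r, memo) := by
        rw [pvBestLoop]
        simp [hfneg]
      rw [hval, hocc]
      exact ⟨hmemo, mr, hr, pvKLe_refl mr, Or.inl rfl, by simp⟩
    · have hs : b ≤ s.length := by
        by_contra hbs
        have := pvFindFromPastLen s w b (by omega)
        rw [← hf] at this
        exact hfneg this
      obtain ⟨hk1, hk2, hk3⟩ :=
        PySem.Chars.findFrom_natCast_spec s w b hs (by rw [← hf]; exact hfneg)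
      rw [← hf] at hk1 hk2 hk3
      have hfnn : (0 : Int) ≤ f := le_trans (by omega) hk1
      have hfle : f ≤ (s.length : Int) := by
        rw [hf, PySem.Chars.findFrom_natCast s w b hs]
        have h1 := PySem.Chars.find_le_length (List.drop b s) w
        simp only [List.length_drop] at h1
        split <;> omega
      have hwle : w.length ≤ s.length - f.toNat := by
        have := hk2.length_le
        simpa using this
      have hclen : (pvRemoveSlice s f (f + (w.length : Int))).length < s.length := by
        unfold pvRemoveSlice
        rw [PySem.List.slice_to s hfnn, PySem.List.slice_from s (by omega)]
        have hwpos : 0 < w.length := List.length_pos_iff.mpr hw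
        simp only [List.length_append, List.length_take, List.length_drop]
        omega
      obtain ⟨hm1, mc, hmc, hval⟩ :=
        hbest memo (pvRemoveSlice s f (f + (w.length : Int))) hclen hmemo
      have hstep : pvBestLoop w fuel (k + 1) memo s r f =
          pvBestLoop w fuel k
            (pvBest w fuel memo (pvRemoveSlice s f (f + (w.length : Int)))).2 s
            (pvTupMin r (pvBest w fuel memo (pvRemoveSlice s f (f + (w.length : Int)))).1)
            (PySem.Chars.findFrom s w (f + 1) none) := by
        rw [pvBestLoop, if_pos hfneg]
        rfl
      have hcast : ((f.toNat + 1 : Nat) : Int) = f + 1 := by omega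
      obtain ⟨hm2, m', hm'val, hm'le, hm'mem, hm'lb⟩ :=
        ihk (f.toNat + 1)
          (pvBest w fuel memo (pvRemoveSlice s f (f + (w.length : Int)))).2
          (pvTupMin r (pvBest w fuel memo (pvRemoveSlice s f (f + (w.length : Int)))).1)
          (pvKmin mr mc) (by omega) hm1
          (by rw [hval, hr]; exact pvTupMin_eq_kmin mr mc)
      rw [hcast] at hm2 hm'val
      have hocc : pvOccA s w b = (f, f + (w.length : Int)) :: pvOccA s w (f.toNat + 1) := by
        rw [pvOccA, dif_pos (by rw [← hf]; omega)]
      rw [hstep, hocc]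
      refine ⟨hm2, m', hm'val, pvKLe_trans hm'le (pvKLe_kmin_left mr mc), ?_, ?_⟩
      · rcases hm'mem with rfl | ⟨c', hc', hr'⟩
        · rcases pvKmin_cases mr mc with hkk | hkk
          · exact Or.inl hkk
          · refine Or.inr ⟨pvRemoveSlice s f (f + (w.length : Int)), ?_, ?_⟩
            · exact List.mem_map.mpr ⟨(f, f + (w.length : Int)), List.mem_cons_self .., rfl⟩
            · rw [hkk]
              exact hmc.1
        · refine Or.inr ⟨c', ?_, hr'⟩
          simp only [List.map_cons]
          exact List.mem_cons_of_mem _ hc'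
      · intro c hc t ht
        simp only [List.map_cons] at hc
        rcases List.mem_cons.mp hc with rfl | hc'
        · exact pvKLe_trans (pvKLe_trans hm'le (pvKLe_kmin_right mr mc)) (hmc.2 t ht)
        · exact hm'lb c hc' t ht

theorem pvBest_ok (w : List Char) (hw : w ≠ []) : ∀ (fuel : Nat) (s : List Char)
    (memo : PySem.Dict (List Char) (Nat × List Char)), s.length < fuel → pvMemoOK w memo →
    pvMemoOK w (pvBest w fuel memo s).2 ∧
      ∃ m, pvIsMin w s m ∧ (pvBest w fuel memo s).1 = (m.length, m) := by
  intro fuel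
  induction fuel with
  | zero =>
    intro s memo hlen
    omega
  | succ fuel ih =>
    intro s memo hlen hmemo
    rw [pvBest]
    cases hget : PySem.Dict.get? memo s with
    | some v =>
      obtain ⟨m, hm, rfl⟩ := hmemo s v hget
      exact ⟨hmemo, m, hm, rfl⟩
    | none =>
      have hbest' : ∀ (memo : PySem.Dict (List Char) (Nat × List Char)) (c : List Char),
          c.length < s.length → pvMemoOK w memo →
          pvMemoOK w (pvBest w fuel memo c).2 ∧
            ∃ m, pvIsMin w c m ∧ (pvBest w fuel memo c).1 = (m.length, m) :=
        fun memo c hc hm => ih c memo (by omega) hm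
      obtain ⟨hm2, m', hval', hle', hmem', hlb'⟩ :=
        pvLoopB_ok w hw fuel s hbest' (s.length + 1) 0 memo (s.length, s) s (by omega) hmemo rfl
      rw [Nat.cast_zero] at hm2 hval'
      have hIsMin : pvIsMin w s m' := by
        constructor
        · rcases hmem' with rfl | ⟨c, hc, hrc⟩
          · exact Relation.ReflTransGen.refl
          · exact Relation.ReflTransGen.head hc hrc
        · intro t ht
          rcases Relation.ReflTransGen.cases_head ht with rfl | ⟨b, hb, hbt⟩
          · exact hle'
          · exact hlb' b hb t hbt
      constructor
      · intro kk vv hkv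
        rw [PySem.Dict.get?_insert] at hkv
        by_cases hks : kk = s
        · rw [if_pos hks] at hkv
          cases hkv
          exact ⟨m', hks ▸ hIsMin, hval'⟩
        · rw [if_neg hks] at hkv
          exact hm2 kk vv hkv
      · exact ⟨m', hIsMin, hval'⟩

-- with word = "", every deletion is a no-op, so only chunk itself is reachable
theorem pvReach_nil {ch t : List Char} (h : pvReach [] ch t) : t = ch := by
  induction h with
  | refl => rfl
  | tail _ hbc ih => exact (pvChild_nil hbc).trans ih

-- ===== VERDICT (by name: the statement is the Claim_ definition above) =====
theorem decode_chunk_spec : Claim_equal_decode_chunk := by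
  intro chunk word _
  unfold Spec_decode_chunk decode_chunk decode_chunk_alt
  have hA := pvA_isMin chunk.toList word.toList
  by_cases hw : word.toList = []
  · rw [if_pos hw, hw]
    rw [hw] at hA
    rw [pvReach_nil hA.1, String.ofList_toList]
  · rw [if_neg hw]
    have hB := pvBest_ok word.toList hw (chunk.toList.length + 1) chunk.toList
      PySem.Dict.empty (by omega)
      (by intro k v h; rw [PySem.Dict.get?_empty] at h; cases h)
    rcases hB.2 with ⟨m, hm, hv⟩
    rw [hv]
    exact congrArg String.ofList (pvIsMin_unique hA hm)
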